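-- pv_equiv track=rewrite | github.com/Sameer-Mann/codes | python/959f.py | f
-- ===== SOURCE A (Python) =====
-- def f(n,x,a):
-- 	count = 0
-- 	for i in range((1<<n)):
-- 		pos = 0
-- 		xor = 0
-- 		while i > 0:
-- 			if i&1:
-- 				xor = xor ^ a[n - pos - 1]
-- 			i = i>>1
-- 			pos += 1
-- 		if xor == x:
-- 			count += 1
-- 	return count
-- ===== SOURCE B (Python) =====
-- def f(n, x, a):
--     cnt = {0: 1}
--     for v in a[:n]:
--         new = dict(cnt)
--         for k, c in cnt.items():
--             new[k ^ v] = new.get(k ^ v, 0) + c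
--         cnt = new
--     return cnt.get(x, 0)
-- ===== Notes on version B (the rewrite author's own statement) =====
-- stated objective: alternative
-- what changed: Replaces the enumeration of all 2^n bitmasks (each with an inner bit loop) by an n-step dictionary DP mapping each reachable xor value to its subset count, finished by a single lookup of x.
import Mathlib
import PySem

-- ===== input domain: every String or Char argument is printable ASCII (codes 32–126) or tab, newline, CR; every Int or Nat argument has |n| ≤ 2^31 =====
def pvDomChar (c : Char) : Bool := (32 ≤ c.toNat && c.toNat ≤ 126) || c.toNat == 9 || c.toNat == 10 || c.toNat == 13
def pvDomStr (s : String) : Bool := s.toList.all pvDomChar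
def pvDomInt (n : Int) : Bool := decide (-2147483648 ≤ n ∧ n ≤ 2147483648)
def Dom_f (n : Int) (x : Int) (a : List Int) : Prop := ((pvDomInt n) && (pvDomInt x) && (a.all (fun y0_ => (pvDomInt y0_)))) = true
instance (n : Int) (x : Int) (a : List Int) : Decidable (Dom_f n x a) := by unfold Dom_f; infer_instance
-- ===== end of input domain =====

-- B replaces A's enumeration of all 2^n bitmasks (with an inner bit loop each) by an
-- n-step dictionary DP (xor value -> number of subsets), then a single lookup of x.

-- ===== PORT A =====
-- the 'while i > 0' loop of A: peels the low bit of i, xors in a[n-pos-1] when set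
def fInner (a : List Int) (n : Int) (i : Nat) (pos : Int) (xr : Int) : Int :=
  if i = 0 then xr
  else
    fInner a n (i >>> 1) (pos + 1)
      (if i &&& 1 = 1 then PySem.Int.bxor xr ((PySem.List.pyGet? a (n - pos - 1)).getD 0) else xr)
termination_by i
decreasing_by
  have h1 : i >>> 1 = i / 2 := Nat.shiftRight_one i
  omega

def f (n : Int) (x : Int) (a : List Int) : Int :=
  (List.range (1 <<< n.toNat)).foldl
    (fun count i => if fInner a n i 0 0 = x then count + 1 else count) 0

-- ===== PORT B =====
-- one step of the DP: new = dict(cnt); for k, c in cnt.items(): new[k ^ v] = new.get(k ^ v, 0) + c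
def fStep (v : Int) (cnt : PySem.Dict Int Int) : PySem.Dict Int Int :=
  cnt.items.foldl
    (fun new kc =>
      new.insert (PySem.Int.bxor kc.1 v) (new.getD (PySem.Int.bxor kc.1 v) 0 + kc.2)) cnt

def f_alt (n : Int) (x : Int) (a : List Int) : Int :=
  ((PySem.List.slice a none (some n)).foldl (fun cnt v => fStep v cnt)
      (PySem.Dict.empty.insert 0 1)).getD x 0

-- ===== PRECONDITION & SPEC =====
-- exactly the inputs on which the Python A returns: n ≥ 0 (else '1 << n' raises ValueError)
-- and n ≤ len(a) (else 'a[n-1]' raises IndexError on the mask i = 1)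
def Pre_f (n : Int) (x : Int) (a : List Int) : Prop := 0 ≤ n ∧ n ≤ (a.length : Int)
instance (n : Int) (x : Int) (a : List Int) : Decidable (Pre_f n x a) := by unfold Pre_f; infer_instance
def pvWitness_f : Int × Int × List Int := (2, 3, [1, 2])

def Spec_f (n : Int) (x : Int) (a : List Int) (out : Int) : Prop := out = f_alt n x a
instance (n : Int) (x : Int) (a : List Int) (out : Int) : Decidable (Spec_f n x a out) := by unfold Spec_f; infer_instance

-- ===== CLAIM (what is proved, stated in full; the proofs are below) =====
def Claim_equal_f : Prop := ∀ (n : Int) (x : Int) (a : List Int), Dom_f n x a → Pre_f n x a → Spec_f n x a (f n x a)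

-- ===== LEMMAS AND PROOFS =====

-- ---- xor algebra on PySem.Int.bxor (Python-exact two's-complement xor) ----
def pvEnc (s : Bool) (m : Nat) : Int := if s then -(m : Int) - 1 else (m : Int)

theorem pvEnc_bxor (s t : Bool) (m k : Nat) :
    PySem.Int.bxor (pvEnc s m) (pvEnc t k) = pvEnc (s != t) (m ^^^ k) := by
  have hm : (0 : Int) ≤ (m : Int) := Int.natCast_nonneg m
  have hk : (0 : Int) ≤ (k : Int) := Int.natCast_nonneg k
  have hm' : ¬ (0 : Int) ≤ -(m : Int) - 1 := by omega
  have hk' : ¬ (0 : Int) ≤ -(k : Int) - 1 := by omega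
  have e1 : -(-(m : Int) - 1) - 1 = (m : Int) := by omega
  have e2 : -(-(k : Int) - 1) - 1 = (k : Int) := by omega
  cases s <;> cases t <;>
    unfold PySem.Int.bxor <;>
    simp only [pvEnc, if_true, if_false, ite_true, ite_false, hm, hk, hm', hk', e1, e2] <;>
    simp [pvEnc]

theorem pvDecompose (z : Int) : ∃ s m, z = pvEnc s m := by
  by_cases h : 0 ≤ z
  · exact ⟨false, z.toNat, by simp [pvEnc]; omega⟩
  · exact ⟨true, (-z - 1).toNat, by simp [pvEnc]; omega⟩

theorem bxor_assoc' (a b c : Int) :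
    PySem.Int.bxor (PySem.Int.bxor a b) c = PySem.Int.bxor a (PySem.Int.bxor b c) := by
  obtain ⟨s, m, rfl⟩ := pvDecompose a
  obtain ⟨t, k, rfl⟩ := pvDecompose b
  obtain ⟨u, j, rfl⟩ := pvDecompose c
  rw [pvEnc_bxor, pvEnc_bxor, pvEnc_bxor, pvEnc_bxor]
  congr 1
  · cases s <;> cases t <;> cases u <;> rfl
  · exact Nat.xor_assoc m k j

theorem zero_bxor (a : Int) : PySem.Int.bxor 0 a = a := by
  rw [PySem.Int.bxor_comm]; exact PySem.Int.bxor_zero a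

theorem bxor_cancel_right (a b : Int) : PySem.Int.bxor (PySem.Int.bxor a b) b = a := by
  rw [bxor_assoc', PySem.Int.bxor_self, PySem.Int.bxor_zero]

theorem bxor_eq_iff (a b t : Int) : PySem.Int.bxor a b = t ↔ a = PySem.Int.bxor t b := by
  constructor
  · rintro rfl; rw [bxor_cancel_right]
  · rintro rfl; rw [bxor_cancel_right]

-- ---- the common specification: number of sublists with xor t ----
def cntSpec : List Int → Int → Int
  | [], t => if t = 0 then 1 else 0
  | v :: l, t => cntSpec l t + cntSpec l (PySem.Int.bxor t v)

theorem cntSpec_append_singleton (l : List Int) (v : Int) : ∀ t,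
    cntSpec (l ++ [v]) t = cntSpec l t + cntSpec l (PySem.Int.bxor t v) := by
  induction l with
  | nil => intro t; simp [cntSpec]
  | cons w l ih =>
      intro t
      show cntSpec (l ++ [v]) t + cntSpec (l ++ [v]) (PySem.Int.bxor t w) = _
      rw [ih, ih]
      have h : PySem.Int.bxor (PySem.Int.bxor t w) v = PySem.Int.bxor (PySem.Int.bxor t v) w := by
        rw [bxor_assoc', bxor_assoc', PySem.Int.bxor_comm w v]
      rw [h]
      show _ = cntSpec l t + cntSpec l (PySem.Int.bxor t w) +
        (cntSpec l (PySem.Int.bxor t v) + cntSpec l (PySem.Int.bxor (PySem.Int.bxor t v) w))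
      ring

theorem cntSpec_reverse (l : List Int) : ∀ t, cntSpec l.reverse t = cntSpec l t := by
  induction l with
  | nil => intro t; rfl
  | cons w l ih =>
      intro t
      rw [List.reverse_cons, cntSpec_append_singleton, ih, ih]
      rfl

-- ---- A-side characterisation ----
def pvG (a : List Int) (n : Int) (q : Int) : Int := (PySem.List.pyGet? a (n - q - 1)).getD 0

theorem fInner_zero (a : List Int) (n : Int) (pos xr : Int) : fInner a n 0 pos xr = xr := by
  rw [fInner]; simp

theorem fInner_step (a : List Int) (n : Int) (i : Nat) (pos xr : Int) (h : i ≠ 0) :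
    fInner a n i pos xr =
      fInner a n (i / 2) (pos + 1)
        (if i % 2 = 1 then PySem.Int.bxor xr (pvG a n pos) else xr) := by
  rw [fInner]
  simp [h, Nat.shiftRight_one, Nat.and_one_is_mod, pvG]

theorem fInner_acc (a : List Int) (n : Int) : ∀ i pos xr,
    fInner a n i pos xr = PySem.Int.bxor xr (fInner a n i pos 0) := by
  intro i
  induction i using Nat.strong_induction_on with
  | _ i ih =>
    intro pos xr
    by_cases h : i = 0
    · subst h; rw [fInner_zero, fInner_zero, PySem.Int.bxor_zero]
    · rw [fInner_step a n i pos xr h, fInner_step a n i pos 0 h]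
      have hlt : i / 2 < i := Nat.div_lt_self (Nat.pos_of_ne_zero h) (by norm_num)
      rw [ih _ hlt (pos + 1), ih _ hlt (pos + 1)
        (if i % 2 = 1 then PySem.Int.bxor 0 (pvG a n pos) else 0)]
      by_cases hodd : i % 2 = 1 <;>
        simp [hodd, zero_bxor, bxor_assoc']

theorem fInner_highbit (a : List Int) (n : Int) : ∀ (k : Nat) (r : Nat) (pos : Int), r < 2 ^ k →
    fInner a n (2 ^ k + r) pos 0 =
      PySem.Int.bxor (fInner a n r pos 0) (pvG a n (pos + (k : Int))) := by
  intro k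
  induction k with
  | zero =>
      intro r pos hr
      interval_cases r
      have h1 : 2 ^ 0 + 0 = 1 := by norm_num
      rw [h1, fInner_step a n 1 pos 0 (by norm_num)]
      norm_num
      simp [fInner_zero, zero_bxor]
  | succ k ih =>
      intro r pos hr
      have h2 : 2 ^ (k + 1) = 2 * 2 ^ k := by ring
      have hne : 2 ^ (k + 1) + r ≠ 0 := by positivity
      rw [fInner_step a n _ pos 0 hne]
      have hdiv : (2 ^ (k + 1) + r) / 2 = 2 ^ k + r / 2 := by omega
      have hmod : (2 ^ (k + 1) + r) % 2 = r % 2 := by omega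
      rw [hdiv, hmod]
      have hr2 : r / 2 < 2 ^ k := by omega
      rw [fInner_acc, ih (r / 2) (pos + 1) hr2]
      have hidx : pos + 1 + (k : Int) = pos + ((k : Nat) + 1 : Nat) := by push_cast; ring
      -- right-hand side: unfold fInner r pos 0 one step (also valid for r = 0)
      have hrhs : fInner a n r pos 0 =
          PySem.Int.bxor (if r % 2 = 1 then PySem.Int.bxor 0 (pvG a n pos) else 0)
            (fInner a n (r / 2) (pos + 1) 0) := by
        by_cases hr0 : r = 0
        · subst hr0; simp [fInner_zero, zero_bxor]
        · rw [fInner_step a n r pos 0 hr0, fInner_acc]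
      rw [hrhs, hidx, bxor_assoc']

-- counting fold = countP
theorem foldl_count_eq (p : Nat → Prop) [DecidablePred p] : ∀ (l : List Nat) (c0 : Int),
    l.foldl (fun c i => if p i then c + 1 else c) c0 = c0 + (l.countP (fun i => decide (p i)) : Int) := by
  intro l
  induction l with
  | nil => intro c0; simp
  | cons w l ih =>
      intro c0
      by_cases h : p w <;> simp [List.countP_cons, h, ih] <;> push_cast <;> ring

theorem countA (a : List Int) (n : Int) (hn : 0 ≤ n) (hlen : n.toNat ≤ a.length) :
    ∀ (k : Nat), k ≤ n.toNat → ∀ t,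
    ((List.range (2 ^ k)).countP (fun i => decide (fInner a n i 0 0 = t)) : Int) =
      cntSpec ((a.drop (n.toNat - k)).take k) t := by
  intro k
  induction k with
  | zero =>
      intro _ t
      simp [fInner_zero]
      show (if (0 : Int) = t then _ else _) = cntSpec [] t
      by_cases h : t = 0 <;> simp [h, cntSpec, eq_comm]
  | succ k ih =>
      intro hk t
      have hk' : k ≤ n.toNat := by omega
      have h2 : 2 ^ (k + 1) = 2 ^ k + 2 ^ k := by ring
      rw [h2, List.range_add, List.countP_append, List.countP_map]
      -- second half: masks with the high bit set pick a[n - k - 1]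
      have hcongr : (List.range (2 ^ k)).countP
            ((fun i => decide (fInner a n i 0 0 = t)) ∘ (fun x => 2 ^ k + x)) =
          (List.range (2 ^ k)).countP
            (fun i => decide (fInner a n i 0 0 = PySem.Int.bxor t (pvG a n (k : Int)))) := by
        apply List.countP_congr
        intro i hi
        have hi' : i < 2 ^ k := List.mem_range.mp hi
        simp only [Function.comp]
        rw [fInner_highbit a n k i 0 hi']
        simp only [zero_add, bxor_eq_iff]
      rw [hcongr]
      -- the element a[n.toNat - k - 1]
      have hklt : n.toNat - k - 1 < a.length := by omega
      have hseg : (a.drop (n.toNat - (k + 1))).take (k + 1) =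
          a[n.toNat - k - 1] :: (a.drop (n.toNat - k)).take k := by
        have h1 : n.toNat - (k + 1) = n.toNat - k - 1 := by omega
        rw [h1, List.drop_eq_getElem_cons hklt]
        have h2' : n.toNat - k - 1 + 1 = n.toNat - k := by omega
        rw [h2']
        rfl
      have hg : pvG a n (k : Int) = a[n.toNat - k - 1] := by
        unfold pvG
        have : n - (k : Int) - 1 = ((n.toNat - k - 1 : Nat) : Int) := by omega
        rw [this, PySem.List.pyGet?_natCast]
        simp [List.getElem?_eq_getElem hklt]
      rw [hseg]
      show _ = cntSpec ((a.drop (n.toNat - k)).take k) t +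
        cntSpec ((a.drop (n.toNat - k)).take k) (PySem.Int.bxor t a[n.toNat - k - 1])
      rw [← ih hk' t, ← hg, ← ih hk' (PySem.Int.bxor t (pvG a n (k : Int)))]
      push_cast
      ring

theorem f_eq_cntSpec (n x : Int) (a : List Int) (hn : 0 ≤ n) (hlen : n.toNat ≤ a.length) :
    f n x a = cntSpec (a.take n.toNat) x := by
  unfold f
  rw [foldl_count_eq (fun i => fInner a n i 0 0 = x)]
  rw [Nat.one_shiftLeft]
  rw [countA a n hn hlen n.toNat (le_refl _) x]
  simp

-- ---- B-side characterisation ----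
theorem fold_items_getD (v : Int) : ∀ (l : List (Int × Int)) (d0 : PySem.Dict Int Int) (j : Int),
    (l.map Prod.fst).Nodup →
    (l.foldl (fun new kc =>
        new.insert (PySem.Int.bxor kc.1 v) (new.getD (PySem.Int.bxor kc.1 v) 0 + kc.2)) d0).getD j 0
      = d0.getD j 0 + (PySem.Dict.mk l).getD (PySem.Int.bxor j v) 0 := by
  intro l
  induction l with
  | nil =>
      intro d0 j _
      simp [PySem.Dict.getD, PySem.Dict.get?]
  | cons kc rest ih =>
      intro d0 j hnd
      obtain ⟨k, c⟩ := kc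
      simp only [List.map_cons, List.nodup_cons] at hnd
      obtain ⟨hk, hnd'⟩ := hnd
      simp only [List.foldl_cons]
      rw [ih _ j hnd']
      rw [PySem.Dict.getD_insert]
      have hr : (PySem.Dict.mk ((k, c) :: rest)).getD (PySem.Int.bxor j v) 0 =
          if k == PySem.Int.bxor j v then c else (PySem.Dict.mk rest).getD (PySem.Int.bxor j v) 0 := by
        rw [PySem.Dict.getD_eq_get?_getD, PySem.Dict.get?_mk_cons]
        split <;> simp [PySem.Dict.getD_eq_get?_getD]
      rw [hr]
      by_cases hkey : k = PySem.Int.bxor j v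
      · have hj : j = PySem.Int.bxor k v := by rw [hkey, bxor_cancel_right]
        have hmem : (PySem.Dict.mk rest).getD (PySem.Int.bxor j v) 0 = 0 := by
          rw [PySem.Dict.getD_eq_get?_getD]
          have hnone : (PySem.Dict.mk rest).get? (PySem.Int.bxor j v) = none := by
            rw [PySem.Dict.get?_eq_none_iff_not_mem_keys, PySem.Dict.keys_mk, ← hkey]
            exact hk
          rw [hnone]
          rfl
        rw [hmem, if_pos hj, if_pos (by simp [hkey] : (k == PySem.Int.bxor j v) = true), ← hj]
        ring
      · have hj : j ≠ PySem.Int.bxor k v := by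
          intro hc
          exact hkey (by rw [hc, bxor_cancel_right])
        have hbne : (k == PySem.Int.bxor j v) = false := by simp [hkey]
        rw [if_neg hj, hbne]
        simp

theorem fStep_getD (cnt : PySem.Dict Int Int) (hnd : cnt.keys.Nodup) (v j : Int) :
    (fStep v cnt).getD j 0 = cnt.getD j 0 + cnt.getD (PySem.Int.bxor j v) 0 := by
  unfold fStep
  rw [fold_items_getD v cnt.items cnt j hnd]

theorem fStep_nodup (cnt : PySem.Dict Int Int) (v : Int) (hnd : cnt.keys.Nodup) :
    (fStep v cnt).keys.Nodup := by
  unfold fStep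
  exact PySem.Dict.nodup_keys_foldl_insert_key cnt.items (fun kc => PySem.Int.bxor kc.1 v)
    (fun d kc => d.getD (PySem.Int.bxor kc.1 v) 0 + kc.2) cnt hnd

theorem foldB_nodup : ∀ (l : List Int) (d : PySem.Dict Int Int), d.keys.Nodup →
    ((l.foldl (fun cnt v => fStep v cnt) d).keys.Nodup) := by
  intro l
  induction l with
  | nil => intro d h; exact h
  | cons w l ih => intro d h; exact ih _ (fStep_nodup d w h)

theorem foldB_getD : ∀ (l : List Int) (t : Int),
    ((l.foldl (fun cnt v => fStep v cnt) (PySem.Dict.empty.insert 0 1)).getD t 0) =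
      cntSpec l.reverse t := by
  intro l
  induction l using List.reverseRecOn with
  | nil =>
      intro t
      show (PySem.Dict.empty.insert (0 : Int) (1 : Int)).getD t 0 = _
      rw [PySem.Dict.getD_insert]
      simp [cntSpec, PySem.Dict.getD_empty]
  | append_singleton l v ih =>
      intro t
      rw [List.foldl_append]
      simp only [List.foldl_cons, List.foldl_nil]
      have hnd : ((l.foldl (fun cnt v => fStep v cnt) (PySem.Dict.empty.insert 0 1)).keys.Nodup) := by
        apply foldB_nodup
        exact PySem.Dict.nodup_keys_insert _ _ _ PySem.Dict.nodup_keys_empty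
      rw [fStep_getD _ hnd v t, ih, ih]
      rw [List.reverse_append]
      rfl

theorem f_alt_eq_cntSpec (n x : Int) (a : List Int) (hn : 0 ≤ n) :
    f_alt n x a = cntSpec (a.take n.toNat) x := by
  unfold f_alt
  rw [PySem.List.slice_to a hn]
  rw [foldB_getD, cntSpec_reverse]

-- ===== VERDICT (by name: the statement is the Claim_ definition above) =====
theorem f_spec : Claim_equal_f := by
  intro n x a _ hpre
  obtain ⟨hn, hlen⟩ := hpre
  unfold Spec_f
  rw [f_eq_cntSpec n x a hn (by omega), f_alt_eq_cntSpec n x a hn]
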